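-- pv_equiv track=rewrite | github.com/Mearnab01/AI_based_attendance | src/screens/student_screen.py | _build_stats_map
-- ===== SOURCE A (Python) =====
-- def _build_stats_map(logs: list) -> dict:
--     stats_map = {}
--     for log in logs:
--         sid = log['subject_id']
--         if sid not in stats_map:
--             stats_map[sid] = {"total": 0, "attended": 0}
--         stats_map[sid]['total'] += 1
--         if log.get('is_present'):
--             stats_map[sid]['attended'] += 1
--     return stats_map
-- ===== SOURCE B (Python) =====
-- def _build_stats_map(logs: list) -> dict:
--     totals = {}
--     for log in logs:
--         sid = log['subject_id']
--         totals[sid] = totals.get(sid, 0) + 1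
--     attended = {}
--     for log in logs:
--         if log.get('is_present'):
--             sid = log['subject_id']
--             attended[sid] = attended.get(sid, 0) + 1
--     return {sid: {"total": t, "attended": attended.get(sid, 0)}
--             for sid, t in totals.items()}
-- ===== Notes on version B (the rewrite author's own statement) =====
-- stated objective: alternative
-- what changed: Replaces the single fused loop that mutates a nested per-subject accumulator with two independent flat counting passes (totals and attended) merged by a final comprehension over totals.
import Mathlib
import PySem

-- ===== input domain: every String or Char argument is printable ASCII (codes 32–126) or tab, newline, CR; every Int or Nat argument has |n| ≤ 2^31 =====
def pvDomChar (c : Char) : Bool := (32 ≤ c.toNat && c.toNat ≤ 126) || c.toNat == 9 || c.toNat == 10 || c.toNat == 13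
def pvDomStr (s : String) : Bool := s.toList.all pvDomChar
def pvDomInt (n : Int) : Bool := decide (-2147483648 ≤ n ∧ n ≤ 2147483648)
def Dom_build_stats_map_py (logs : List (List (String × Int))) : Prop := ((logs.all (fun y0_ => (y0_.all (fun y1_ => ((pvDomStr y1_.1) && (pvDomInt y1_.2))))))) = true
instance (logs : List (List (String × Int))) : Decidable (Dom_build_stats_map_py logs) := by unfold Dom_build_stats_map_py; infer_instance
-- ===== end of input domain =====

-- B replaces A's single fused loop over a nested accumulator by two flat counting passes merged at the end (alternative decomposition, same cost).


-- ===== PORT A =====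
def build_stats_map_py (logs : List (List (String × Int))) : List (Int × List (String × Int)) :=
  let stats := logs.foldl (fun (sm : PySem.Dict Int (PySem.Dict String Int)) log =>
    match (PySem.Dict.mk log).get? "subject_id" with
    | none => sm  -- Python raises KeyError here; such inputs are excluded by Pre_
    | some sid =>
      let sm1 := if sm.contains sid then sm
                 else sm.insert sid (PySem.Dict.mk [("total", 0), ("attended", 0)])
      -- stats_map[sid]['total'] += 1  ('total' is always present in the inner dict A itself created)
      let inner := (sm1.getD sid (PySem.Dict.mk [])).modify "total" 0 (· + 1)
      let inner := if (PySem.Dict.mk log).getD "is_present" 0 ≠ 0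
                   then inner.modify "attended" 0 (· + 1) else inner
      sm1.insert sid inner) (PySem.Dict.mk [])
  stats.items.map (fun p => (p.1, p.2.items))

-- ===== PORT B =====
def build_stats_map_py_alt (logs : List (List (String × Int))) : List (Int × List (String × Int)) :=
  let totals := logs.foldl (fun (d : PySem.Dict Int Int) log =>
    match (PySem.Dict.mk log).get? "subject_id" with
    | none => d  -- Python raises KeyError here; such inputs are excluded by Pre_
    | some sid => d.insert sid (d.getD sid 0 + 1)) (PySem.Dict.mk [])
  let attended := logs.foldl (fun (d : PySem.Dict Int Int) log =>
    if (PySem.Dict.mk log).getD "is_present" 0 ≠ 0 then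
      match (PySem.Dict.mk log).get? "subject_id" with
      | none => d
      | some sid => d.insert sid (d.getD sid 0 + 1)
    else d) (PySem.Dict.mk [])
  totals.items.map (fun p => (p.1, [("total", p.2), ("attended", attended.getD p.1 0)]))

-- ===== PRECONDITION & SPEC =====
-- Pre_ excludes exactly the logs on which Python raises KeyError: a log dict without key 'subject_id'.
def Pre_build_stats_map_py (logs : List (List (String × Int))) : Prop :=
  ∀ log ∈ logs, (PySem.Dict.mk log).contains "subject_id" = true
instance (logs : List (List (String × Int))) : Decidable (Pre_build_stats_map_py logs) := by unfold Pre_build_stats_map_py; infer_instance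
def pvWitness_build_stats_map_py : (List (List (String × Int))) :=
  [[("subject_id", 1), ("is_present", 1)], [("subject_id", 1)], [("subject_id", 2), ("is_present", 0)]]

def Spec_build_stats_map_py (logs : List (List (String × Int))) (out : List (Int × List (String × Int))) : Prop := out = build_stats_map_py_alt logs
instance (logs : List (List (String × Int))) (out : List (Int × List (String × Int))) : Decidable (Spec_build_stats_map_py logs out) := by unfold Spec_build_stats_map_py; infer_instance

-- ===== CLAIM (what is proved, stated in full; the proofs are below) =====
def Claim_equal_build_stats_map_py : Prop := ∀ (logs : List (List (String × Int))), Dom_build_stats_map_py logs → Pre_build_stats_map_py logs → Spec_build_stats_map_py logs (build_stats_map_py logs)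

-- ===== LEMMAS AND PROOFS =====

-- step functions (identical to the inline lambdas of the ports)
def pvStepA (sm : PySem.Dict Int (PySem.Dict String Int)) (log : List (String × Int)) : PySem.Dict Int (PySem.Dict String Int) :=
  match (PySem.Dict.mk log).get? "subject_id" with
  | none => sm
  | some sid =>
    let sm1 := if sm.contains sid then sm
               else sm.insert sid (PySem.Dict.mk [("total", 0), ("attended", 0)])
    let inner := (sm1.getD sid (PySem.Dict.mk [])).modify "total" 0 (· + 1)
    let inner := if (PySem.Dict.mk log).getD "is_present" 0 ≠ 0
                 then inner.modify "attended" 0 (· + 1) else inner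
    sm1.insert sid inner

def pvStepT (d : PySem.Dict Int Int) (log : List (String × Int)) : PySem.Dict Int Int :=
  match (PySem.Dict.mk log).get? "subject_id" with
  | none => d
  | some sid => d.insert sid (d.getD sid 0 + 1)

def pvStepAtt (d : PySem.Dict Int Int) (log : List (String × Int)) : PySem.Dict Int Int :=
  if (PySem.Dict.mk log).getD "is_present" 0 ≠ 0 then
    match (PySem.Dict.mk log).get? "subject_id" with
    | none => d
    | some sid => d.insert sid (d.getD sid 0 + 1)
  else d

def pvInner (tv av : Int) : PySem.Dict String Int := PySem.Dict.mk [("total", tv), ("attended", av)]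

def pvMkA (t a : PySem.Dict Int Int) : PySem.Dict Int (PySem.Dict String Int) :=
  PySem.Dict.mk (t.items.map (fun p => (p.1, pvInner p.2 (a.getD p.1 0))))

lemma contains_pvMkA (t a : PySem.Dict Int Int) (k : Int) :
    (pvMkA t a).contains k = t.contains k := by
  show (t.items.map _).any _ = t.items.any _
  simp [List.any_map, Function.comp_def]

lemma get?_mk_map (l : List (Int × Int)) (f : Int → Int → PySem.Dict String Int) (k : Int) :
    (PySem.Dict.mk (l.map (fun p => (p.1, f p.1 p.2)))).get? k
      = ((PySem.Dict.mk l).get? k).map (fun v => f k v) := by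
  induction l with
  | nil => rfl
  | cons p rest ih =>
    obtain ⟨s, v⟩ := p
    by_cases h : s = k
    · simp [PySem.Dict.get?_mk_cons, h]
    · simp [PySem.Dict.get?_mk_cons, h, ih]

lemma get?_pvMkA (t a : PySem.Dict Int Int) (k : Int) :
    (pvMkA t a).get? k = (t.get? k).map (fun v => pvInner v (a.getD k 0)) := by
  have := get?_mk_map t.items (fun s v => pvInner v (a.getD s 0)) k
  simpa [pvMkA] using this



lemma contains_of_mem_items (t : PySem.Dict Int Int) {q : Int × Int} (hq : q ∈ t.items) :
    t.contains q.1 = true := by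
  show t.items.any _ = true
  simp only [List.any_eq_true]
  exact ⟨q, hq, by simp⟩

lemma getD_pvMkA_of_contains (t a : PySem.Dict Int Int) (k : Int) (h : t.contains k = true) :
    (pvMkA t a).getD k (PySem.Dict.mk []) = pvInner (t.getD k 0) (a.getD k 0) := by
  rw [PySem.Dict.contains_eq_isSome_get?] at h
  obtain ⟨v, hv⟩ := Option.isSome_iff_exists.mp h
  rw [PySem.Dict.getD_eq_get?_getD, get?_pvMkA, hv, PySem.Dict.getD_of_get?_eq_some _ _ hv]
  rfl

lemma pvStep_eq (t a : PySem.Dict Int Int) (log : List (String × Int))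
    (hnd : t.keys.Nodup)
    (hinv : ∀ k, t.contains k = false → a.getD k 0 = 0)
    (hsid : (PySem.Dict.mk log).contains "subject_id" = true) :
    pvStepA (pvMkA t a) log = pvMkA (pvStepT t log) (pvStepAtt a log) := by
  rw [PySem.Dict.contains_eq_isSome_get?] at hsid
  obtain ⟨sid, hg⟩ := Option.isSome_iff_exists.mp hsid
  simp only [pvStepA, pvStepT, pvStepAtt, hg]
  by_cases hc : t.contains sid = true
  · -- sid already a key
    rw [contains_pvMkA, hc]
    simp only [reduceIte]
    rw [getD_pvMkA_of_contains t a sid hc]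
    by_cases hp : (PySem.Dict.mk log).getD "is_present" 0 ≠ 0
    · simp only [if_pos hp]
      apply PySem.Dict.ext
      rw [PySem.Dict.items_insert_of_contains _ _ (by rw [contains_pvMkA]; exact hc)]
      rw [show pvMkA t a = PySem.Dict.mk (t.items.map (fun p => (p.1, pvInner p.2 (a.getD p.1 0)))) from rfl]
      rw [show (PySem.Dict.mk (t.items.map (fun p => (p.1, pvInner p.2 (a.getD p.1 0))))).items
            = t.items.map (fun p => (p.1, pvInner p.2 (a.getD p.1 0))) from rfl]
      rw [show pvMkA (t.insert sid (t.getD sid 0 + 1)) (a.insert sid (a.getD sid 0 + 1))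
            = PySem.Dict.mk (((t.insert sid (t.getD sid 0 + 1)).items).map
                (fun p => (p.1, pvInner p.2 ((a.insert sid (a.getD sid 0 + 1)).getD p.1 0)))) from rfl]
      rw [PySem.Dict.items_insert_of_contains _ _ hc]
      simp only [List.map_map]
      apply List.map_congr_left
      intro q hq
      obtain ⟨q1, q2⟩ := q
      by_cases h1 : q1 = sid
      · subst h1
        have hv : t.getD q1 0 = q2 := PySem.Dict.getD_of_mem_items _ hq hnd 0
        simp [Function.comp, hv, PySem.Dict.getD_insert_self]
        rfl
      · simp [Function.comp, h1, PySem.Dict.getD_insert_of_ne _ _ _ h1]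
    · simp only [if_neg hp]
      apply PySem.Dict.ext
      rw [PySem.Dict.items_insert_of_contains _ _ (by rw [contains_pvMkA]; exact hc)]
      rw [show (pvMkA t a).items = t.items.map (fun p => (p.1, pvInner p.2 (a.getD p.1 0))) from rfl]
      rw [show pvMkA (t.insert sid (t.getD sid 0 + 1)) a
            = PySem.Dict.mk (((t.insert sid (t.getD sid 0 + 1)).items).map
                (fun p => (p.1, pvInner p.2 (a.getD p.1 0)))) from rfl]
      rw [PySem.Dict.items_insert_of_contains _ _ hc]
      simp only [List.map_map]
      apply List.map_congr_left
      intro q hq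
      obtain ⟨q1, q2⟩ := q
      by_cases h1 : q1 = sid
      · subst h1
        have hv : t.getD q1 0 = q2 := PySem.Dict.getD_of_mem_items _ hq hnd 0
        simp [Function.comp, hv]
        rfl
      · simp [Function.comp, h1]
  · -- fresh sid
    have hc' : t.contains sid = false := by simpa using hc
    have ha0 : a.getD sid 0 = 0 := hinv sid hc'
    have ht0 : t.getD sid 0 = 0 := PySem.Dict.getD_of_not_contains _ _ hc'
    rw [contains_pvMkA, hc']
    simp only [Bool.false_eq_true, reduceIte]
    rw [PySem.Dict.getD_insert_self]
    by_cases hp : (PySem.Dict.mk log).getD "is_present" 0 ≠ 0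
    · simp only [if_pos hp]
      rw [PySem.Dict.insert_insert_self]
      apply PySem.Dict.ext
      rw [PySem.Dict.items_insert_of_not_contains _ _ (by rw [contains_pvMkA]; exact hc')]
      rw [show (pvMkA t a).items = t.items.map (fun p => (p.1, pvInner p.2 (a.getD p.1 0))) from rfl]
      rw [show pvMkA (t.insert sid (t.getD sid 0 + 1)) (a.insert sid (a.getD sid 0 + 1))
            = PySem.Dict.mk (((t.insert sid (t.getD sid 0 + 1)).items).map
                (fun p => (p.1, pvInner p.2 ((a.insert sid (a.getD sid 0 + 1)).getD p.1 0)))) from rfl]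
      rw [PySem.Dict.items_insert_of_not_contains _ _ hc']
      rw [List.map_append]
      congr 1
      · apply List.map_congr_left
        intro q hq
        have h1 : q.1 ≠ sid := by
          intro h; exact absurd (h ▸ contains_of_mem_items t hq) (by simp [hc'])
        simp [PySem.Dict.getD_insert_of_ne _ _ _ h1]
      · simp [ht0, ha0, PySem.Dict.getD_insert_self]
        rfl
    · simp only [if_neg hp]
      rw [PySem.Dict.insert_insert_self]
      apply PySem.Dict.ext
      rw [PySem.Dict.items_insert_of_not_contains _ _ (by rw [contains_pvMkA]; exact hc')]
      rw [show (pvMkA t a).items = t.items.map (fun p => (p.1, pvInner p.2 (a.getD p.1 0))) from rfl]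
      rw [show pvMkA (t.insert sid (t.getD sid 0 + 1)) a
            = PySem.Dict.mk (((t.insert sid (t.getD sid 0 + 1)).items).map
                (fun p => (p.1, pvInner p.2 (a.getD p.1 0)))) from rfl]
      rw [PySem.Dict.items_insert_of_not_contains _ _ hc']
      rw [List.map_append]
      congr 1
      simp [ht0, ha0]
      rfl

lemma pvLoop_eq : ∀ (logs : List (List (String × Int))) (t a : PySem.Dict Int Int),
    t.keys.Nodup → (∀ k, t.contains k = false → a.getD k 0 = 0) →
    (∀ log ∈ logs, (PySem.Dict.mk log).contains "subject_id" = true) →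
    logs.foldl pvStepA (pvMkA t a) = pvMkA (logs.foldl pvStepT t) (logs.foldl pvStepAtt a) := by
  intro logs
  induction logs with
  | nil => intro t a _ _ _; rfl
  | cons log rest ih =>
    intro t a hnd hinv hpre
    simp only [List.foldl_cons]
    rw [pvStep_eq t a log hnd hinv (hpre log List.mem_cons_self)]
    apply ih
    · cases h : (PySem.Dict.mk log).get? "subject_id" with
      | none => simpa only [pvStepT, h] using hnd
      | some sid =>
        simp only [pvStepT, h]
        exact PySem.Dict.nodup_keys_insert _ _ _ hnd
    · intro k hk
      cases h : (PySem.Dict.mk log).get? "subject_id" with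
      | none =>
        simp only [pvStepT, h] at hk
        simp only [pvStepAtt, h]
        split_ifs with hp
        · exact hinv k hk
        · exact hinv k hk
      | some sid =>
        simp only [pvStepT, h] at hk
        simp only [pvStepAtt, h]
        rw [PySem.Dict.contains_insert] at hk
        have hks : k ≠ sid := by
          intro he; simp [he] at hk
        have hkt : t.contains k = false := by
          simpa [hks] using hk
        split_ifs with hp
        · rw [PySem.Dict.getD_insert_of_ne _ _ _ hks]
          exact hinv k hkt
        · exact hinv k hkt
    · intro l hl; exact hpre l (List.mem_cons_of_mem _ hl)

lemma portA_as_fold (logs : List (List (String × Int))) :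
    build_stats_map_py logs
      = (logs.foldl pvStepA (pvMkA (PySem.Dict.mk []) (PySem.Dict.mk []))).items.map
          (fun p => (p.1, p.2.items)) := rfl

lemma portB_as_fold (logs : List (List (String × Int))) :
    build_stats_map_py_alt logs
      = (logs.foldl pvStepT (PySem.Dict.mk [])).items.map
          (fun p => (p.1, [("total", p.2),
            ("attended", (logs.foldl pvStepAtt (PySem.Dict.mk [])).getD p.1 0)])) := rfl

-- ===== VERDICT (by name: the statement is the Claim_ definition above) =====
theorem build_stats_map_py_spec : Claim_equal_build_stats_map_py := by
  intro logs _ hpre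
  unfold Spec_build_stats_map_py
  rw [portA_as_fold, portB_as_fold,
    pvLoop_eq logs (PySem.Dict.mk []) (PySem.Dict.mk []) List.nodup_nil (fun _ _ => rfl) hpre]
  simp [pvMkA, pvInner, List.map_map, Function.comp_def]
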